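-- pv_equiv track=rewrite | github.com/Arina-prog/Python_homeworks | homework 7/task_7_4.py | type_count
-- ===== SOURCE A (Python) =====
-- def type_count(dic):
--     free_ec = 0
--     free_lux = 0
--     free_bus = 0
--     for i in dic.values():
--         if i[1]== "econom" and i[0]=="free":
--             free_ec  += 1
--         if i[1] =="lux" and i[0] =="free":
--             free_lux +=1
--         if i[1] =="business"  and i[0] =="free" :
--             free_bus += 1
--     return  free_bus,free_ec, free_lux,
-- ===== SOURCE B (Python) =====
-- def type_count(dic):
--     free = [i[1] for i in dic.values() if i[0] == "free"]
--     return free.count("business"), free.count("econom"), free.count("lux")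
-- ===== Notes on version B (the rewrite author's own statement) =====
-- stated objective: simpler
-- what changed: B has no counter loop at all: it first builds the list of types of free rooms with one filtering comprehension and then answers with three list.count calls, instead of A's single pass maintaining three guarded scalar accumulators.
import Mathlib
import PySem

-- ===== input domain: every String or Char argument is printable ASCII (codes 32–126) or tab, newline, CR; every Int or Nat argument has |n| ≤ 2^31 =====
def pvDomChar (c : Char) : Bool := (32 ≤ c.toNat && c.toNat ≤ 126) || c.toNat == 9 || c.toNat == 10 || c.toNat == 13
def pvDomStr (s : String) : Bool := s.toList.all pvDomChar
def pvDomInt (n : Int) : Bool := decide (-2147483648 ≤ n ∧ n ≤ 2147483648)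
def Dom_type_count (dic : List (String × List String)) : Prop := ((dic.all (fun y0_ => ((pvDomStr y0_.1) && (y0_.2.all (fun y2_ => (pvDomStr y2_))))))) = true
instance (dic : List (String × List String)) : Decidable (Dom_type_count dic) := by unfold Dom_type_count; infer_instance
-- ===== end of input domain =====

-- B drops A's accumulator loop: one filtering comprehension collecting free-room types, then three list.count calls (simpler).


-- ===== PORT A =====
def type_count (dic : List (String × List String)) : Int × Int × Int :=
  let st := (PySem.Dict.ofList dic).values.foldl
    (fun (st : Int × Int × Int) i =>
      let st := if PySem.List.pyGet? i 1 = some "econom" ∧ PySem.List.pyGet? i 0 = some "free"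
                then (st.1 + 1, st.2.1, st.2.2) else st
      let st := if PySem.List.pyGet? i 1 = some "lux" ∧ PySem.List.pyGet? i 0 = some "free"
                then (st.1, st.2.1 + 1, st.2.2) else st
      let st := if PySem.List.pyGet? i 1 = some "business" ∧ PySem.List.pyGet? i 0 = some "free"
                then (st.1, st.2.1, st.2.2 + 1) else st
      st)
    (0, 0, 0)
  (st.2.2, st.1, st.2.1)

-- ===== PORT B =====
-- the comprehension [i[1] for i in dic.values() if i[0] == "free"] as filter-then-map
def type_count_alt (dic : List (String × List String)) : Int × Int × Int :=
  let free := ((PySem.Dict.ofList dic).values.filter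
      (fun i => PySem.List.pyGet? i 0 = some "free")).map
      (fun i => (PySem.List.pyGet? i 1).getD "")
  ((PySem.List.count free "business" : Int),
   (PySem.List.count free "econom" : Int),
   (PySem.List.count free "lux" : Int))

-- ===== PRECONDITION & SPEC =====
-- Pre_ excludes exactly the inputs where some dict value is a list of length < 2, on which A raises IndexError.
def Pre_type_count (dic : List (String × List String)) : Prop :=
  ∀ i ∈ (PySem.Dict.ofList dic).values, 2 ≤ i.length
instance (dic : List (String × List String)) : Decidable (Pre_type_count dic) := by unfold Pre_type_count; infer_instance
def pvWitness_type_count : (List (String × List String)) :=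
  [("101", ["free", "econom"]), ("102", ["busy", "lux"]), ("103", ["free", "business"])]
def Spec_type_count (dic : List (String × List String)) (out : Int × Int × Int) : Prop := out = type_count_alt dic
instance (dic : List (String × List String)) (out : Int × Int × Int) : Decidable (Spec_type_count dic out) := by unfold Spec_type_count; infer_instance

-- ===== CLAIM =====
def Claim_equal_type_count : Prop := ∀ (dic : List (String × List String)), Dom_type_count dic → Pre_type_count dic → Spec_type_count dic (type_count dic)

-- ===== LEMMAS AND PROOFS =====

-- B's side: counting a type k in the filtered-and-mapped list is one combined countP over the raw values.
theorem tc_count_free (l : List (List String)) (k : String) (hk : k ≠ "") :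
    PySem.List.count ((l.filter (fun i => PySem.List.pyGet? i 0 = some "free")).map
        (fun i => (PySem.List.pyGet? i 1).getD "")) k
      = l.countP (fun i => decide (PySem.List.pyGet? i 1 = some k ∧ PySem.List.pyGet? i 0 = some "free")) := by
  induction l with
  | nil => simp [PySem.List.count]
  | cons i l ih =>
    simp only [List.filter_cons, List.countP_cons]
    by_cases h0 : PySem.List.pyGet? i 0 = some "free"
    · rw [if_pos (by simpa using h0)]
      simp only [List.map_cons, PySem.List.count, List.count_cons] at ih ⊢
      by_cases h1 : PySem.List.pyGet? i 1 = some k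
      · simp [ih, h0, h1, PySem.List.count]
      · have : ((PySem.List.pyGet? i 1).getD "") ≠ k := by
          cases hv : PySem.List.pyGet? i 1 with
          | none => simpa using Ne.symm hk
          | some s => simp only [hv, Option.getD_some]; intro h; exact h1 (by rw [hv, h])
        simp [ih, h0, h1, this, PySem.List.count]
    · rw [if_neg (by simpa using h0)]
      simp only [PySem.List.count] at ih
      simp [ih, h0]

-- A's fold: the three accumulators as counts.
theorem tc_foldA (l : List (List String)) (st : Int × Int × Int) :
    l.foldl
    (fun (st : Int × Int × Int) i =>
      let st := if PySem.List.pyGet? i 1 = some "econom" ∧ PySem.List.pyGet? i 0 = some "free"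
                then (st.1 + 1, st.2.1, st.2.2) else st
      let st := if PySem.List.pyGet? i 1 = some "lux" ∧ PySem.List.pyGet? i 0 = some "free"
                then (st.1, st.2.1 + 1, st.2.2) else st
      let st := if PySem.List.pyGet? i 1 = some "business" ∧ PySem.List.pyGet? i 0 = some "free"
                then (st.1, st.2.1, st.2.2 + 1) else st
      st) st
    = (st.1 + l.countP (fun i => decide (PySem.List.pyGet? i 1 = some "econom" ∧ PySem.List.pyGet? i 0 = some "free")),
       st.2.1 + l.countP (fun i => decide (PySem.List.pyGet? i 1 = some "lux" ∧ PySem.List.pyGet? i 0 = some "free")),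
       st.2.2 + l.countP (fun i => decide (PySem.List.pyGet? i 1 = some "business" ∧ PySem.List.pyGet? i 0 = some "free"))) := by
  induction l generalizing st with
  | nil => simp
  | cons i l ih =>
    simp only [List.foldl_cons, List.countP_cons]
    rw [ih]
    by_cases hE : PySem.List.pyGet? i 1 = some "econom" ∧ PySem.List.pyGet? i 0 = some "free" <;>
    by_cases hL : PySem.List.pyGet? i 1 = some "lux" ∧ PySem.List.pyGet? i 0 = some "free" <;>
    by_cases hB : PySem.List.pyGet? i 1 = some "business" ∧ PySem.List.pyGet? i 0 = some "free" <;>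
    first
      | exact absurd (hE.1.symm.trans hL.1) (by decide)
      | exact absurd (hE.1.symm.trans hB.1) (by decide)
      | exact absurd (hL.1.symm.trans hB.1) (by decide)
      | (simp [hE, hL, hB, Prod.ext_iff]; omega)
      | simp [hE, hL, hB]

-- ===== VERDICT =====
theorem type_count_spec : Claim_equal_type_count := by
  intro dic _ _
  show type_count dic = type_count_alt dic
  simp only [type_count, type_count_alt, tc_foldA,
    tc_count_free _ _ (show ("business" : String) ≠ "" by decide),
    tc_count_free _ _ (show ("econom" : String) ≠ "" by decide),
    tc_count_free _ _ (show ("lux" : String) ≠ "" by decide)]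
  simp
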